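-- pv_equiv track=rewrite | github.com/Faroukemam/depi_projects | python_session/ass.py | TxtWordEX
-- ===== SOURCE A (Python) =====
-- def IsLetter(CH):
--     return CH.isalpha()
--
-- def LowerCaseEx(word):
--     return ''.join(char.lower() for char in word)
--
-- def WordCleaner(word):
--     return ''.join(c for c in LowerCaseEx(word) if IsLetter(c))
--
-- def TxtWordEX(Txt):
--     terms = Txt.split()
--     words = []
--     for word in terms:
--         word = WordCleaner(word)
--         if word:  # Add only if the cleaned word is not empty
--             words.append(word)
--     return words
-- ===== SOURCE B (Python) =====
-- def TxtWordEX(Txt):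
--     # Single-pass character scan: whitespace flushes the current cleaned buffer,
--     # other characters are lowercased and their alphabetic results buffered.
--     words = []
--     buf = []
--     for ch in Txt:
--         if ch.isspace():
--             if buf:
--                 words.append(''.join(buf))
--                 buf = []
--         else:
--             for lc in ch.lower():
--                 if lc.isalpha():
--                     buf.append(lc)
--     if buf:
--         words.append(''.join(buf))
--     return words
-- ===== Notes on version B (the rewrite author's own statement) =====
-- stated objective: alternative
-- what changed: Replaces split-then-clean-each-token (two phases with intermediate token list) by a single character-scan state machine that keeps a cleaned-word buffer and flushes it at whitespace.
import Mathlib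
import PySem

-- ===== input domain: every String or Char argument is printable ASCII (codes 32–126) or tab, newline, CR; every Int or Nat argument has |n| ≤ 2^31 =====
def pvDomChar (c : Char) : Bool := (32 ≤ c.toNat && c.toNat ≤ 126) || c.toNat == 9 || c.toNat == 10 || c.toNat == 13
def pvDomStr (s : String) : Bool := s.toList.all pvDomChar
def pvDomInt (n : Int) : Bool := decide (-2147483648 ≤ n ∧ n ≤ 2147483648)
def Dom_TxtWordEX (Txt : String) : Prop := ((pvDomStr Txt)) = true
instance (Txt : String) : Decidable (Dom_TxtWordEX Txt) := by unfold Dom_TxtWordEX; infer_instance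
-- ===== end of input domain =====

-- B replaces A's split-then-clean two-phase pipeline by a one-pass character-scan
-- state machine (alternative decomposition, same asymptotic cost).

-- ===== PORT A =====
-- helpers are ported on List Char (the PySem.Chars side of Python strings)
def IsLetterA (CH : Char) : Bool := PySem.Chars.isalpha CH

-- ''.join(char.lower() for char in word)
def LowerCaseExA (word : List Char) : List Char :=
  PySem.Chars.join [] (word.map (fun ch => PySem.Chars.lower [ch]))

-- ''.join(c for c in LowerCaseEx(word) if IsLetter(c)) — a join of the kept single chars
def WordCleanerA (word : List Char) : List Char :=
  PySem.Chars.join [] (((LowerCaseExA word).filter (fun c => IsLetterA c)).map (fun c => [c]))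

def TxtWordEX (Txt : String) : List String :=
  (PySem.Chars.split₀ Txt.toList).foldl
    (fun words word =>
      let w := WordCleanerA word
      if w.isEmpty then words else words ++ [String.ofList w])
    []

-- ===== PORT B =====
-- loop body: whitespace flushes the buffer, any other char contributes its
-- lowercased alphabetic characters to the buffer
def bStep (st : List String × List Char) (ch : Char) : List String × List Char :=
  if PySem.Chars.isspace ch then
    (if st.2.isEmpty then st else (st.1 ++ [String.ofList st.2], []))
  else
    (st.1, st.2 ++ (PySem.Chars.lower [ch]).filter (fun c => PySem.Chars.isalpha c))

def TxtWordEX_alt (Txt : String) : List String :=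
  let st := Txt.toList.foldl bStep ([], [])
  if st.2.isEmpty then st.1 else st.1 ++ [String.ofList st.2]

-- ===== PRECONDITION & SPEC =====
def Spec_TxtWordEX (Txt : String) (out : List String) : Prop := out = TxtWordEX_alt Txt
instance (Txt : String) (out : List String) : Decidable (Spec_TxtWordEX Txt out) := by unfold Spec_TxtWordEX; infer_instance

-- ===== CLAIM (what is proved, stated in full; the proofs are below) =====
def Claim_equal_TxtWordEX : Prop := ∀ (Txt : String), Dom_TxtWordEX Txt → Spec_TxtWordEX Txt (TxtWordEX Txt)

-- ===== LEMMAS AND PROOFS =====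

-- per-character cleaning function both programs agree on
def cleanL (w : List Char) : List Char :=
  (PySem.Chars.lower w).filter (fun c => PySem.Chars.isalpha c)

theorem lowerEx_eq (w : List Char) : LowerCaseExA w = PySem.Chars.lower w := by
  unfold LowerCaseExA
  rw [show w.map (fun ch => PySem.Chars.lower [ch])
        = (PySem.Chars.lower w).map (fun c => [c]) from by simp [PySem.Chars.lower]]
  exact PySem.Chars.join_nil_singletons _

theorem clean_eq (w : List Char) : WordCleanerA w = cleanL w := by
  unfold WordCleanerA cleanL IsLetterA
  rw [PySem.Chars.join_nil_singletons, lowerEx_eq]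

theorem cleanL_nil : cleanL [] = [] := rfl

-- A's fold over the token list, as a named function
def aRun (ws : List (List Char)) (words : List String) : List String :=
  ws.foldl
    (fun words word =>
      let w := WordCleanerA word
      if w.isEmpty then words else words ++ [String.ofList w])
    words

-- B's scan followed by the final flush, as a named function
def bRun (s : List Char) (st : List String × List Char) : List String :=
  let r := s.foldl bStep st
  if r.2.isEmpty then r.1 else r.1 ++ [String.ofList r.2]

theorem aRun_cons (w : List Char) (ws : List (List Char)) (words : List String) :
    aRun (w :: ws) words
      = aRun ws (if (WordCleanerA w).isEmpty then words else words ++ [String.ofList (WordCleanerA w)]) := by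
  simp [aRun]

theorem aRun_cons_of_empty {w : List Char} (ws : List (List Char)) (words : List String)
    (h : WordCleanerA w = []) : aRun (w :: ws) words = aRun ws words := by
  rw [aRun_cons, h]; rfl

theorem aRun_cons_of_nonempty {w : List Char} (ws : List (List Char)) (words : List String)
    (h : ¬ (WordCleanerA w).isEmpty = true) :
    aRun (w :: ws) words = aRun ws (words ++ [String.ofList (WordCleanerA w)]) := by
  rw [aRun_cons, if_neg h]

theorem bRun_cons (c : Char) (s : List Char) (st : List String × List Char) :
    bRun (c :: s) st = bRun s (bStep st c) := by
  simp [bRun]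

theorem go_acc (s : List Char) : ∀ (cur : List Char) (acc : List (List Char)),
    PySem.Chars.split₀.go s cur acc = acc.reverse ++ PySem.Chars.split₀.go s cur [] := by
  induction s with
  | nil =>
    intro cur acc
    simp only [PySem.Chars.split₀.go]
    by_cases h : cur.isEmpty <;> simp [h]
  | cons c s ih =>
    intro cur acc
    simp only [PySem.Chars.split₀.go]
    by_cases hs : PySem.Chars.isspace c
    · by_cases h : cur.isEmpty <;>
        simp [hs, h, ih [] acc, ih [] [cur.reverse], ih [] (cur.reverse :: acc)]
    · simp [hs, ih (c :: cur) acc]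

theorem main_lemma (s : List Char) : ∀ (cur : List Char) (words : List String),
    bRun s (words, cleanL cur.reverse) = aRun (PySem.Chars.split₀.go s cur []) words := by
  induction s with
  | nil =>
    intro cur words
    simp only [PySem.Chars.split₀.go, bRun, List.foldl_nil]
    by_cases h : cur.isEmpty
    · have hc : cur = [] := by simpa [List.isEmpty_iff] using h
      simp [hc, cleanL_nil, aRun]
    · simp [h, aRun, clean_eq]
  | cons c s ih =>
    intro cur words
    simp only [PySem.Chars.split₀.go]
    by_cases hs : PySem.Chars.isspace c
    · simp only [hs, if_pos]
      by_cases hb : (cleanL cur.reverse).isEmpty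
      · -- buffer already empty: B keeps its state; A may flush a token that cleans to nothing
        have hbuf : cleanL cur.reverse = [] := by simpa [List.isEmpty_iff] using hb
        have hB : bStep (words, cleanL cur.reverse) c = (words, cleanL ([] : List Char).reverse) := by
          simp [bStep, hs, hbuf, cleanL_nil]
        by_cases h : cur.isEmpty
        · rw [bRun_cons, hB, ih [] words, if_pos h]
        · rw [bRun_cons, hB, ih [] words, if_neg h, go_acc s [] [cur.reverse],
            List.reverse_cons, List.reverse_nil, List.nil_append, List.singleton_append,
            aRun_cons_of_empty _ _ (by rw [clean_eq]; exact hbuf)]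
      · -- buffer nonempty: both sides flush the cleaned word
        have hcur : cur.isEmpty = false := by
          cases cur with
          | nil => simp [cleanL_nil] at hb
          | cons _ _ => rfl
        have hB : bStep (words, cleanL cur.reverse) c
            = (words ++ [String.ofList (cleanL cur.reverse)], cleanL ([] : List Char).reverse) := by
          simp [bStep, hs, hb, cleanL_nil]
        rw [bRun_cons, hB, ih [] (words ++ [String.ofList (cleanL cur.reverse)]), hcur,
          if_neg Bool.false_ne_true, go_acc s [] [cur.reverse],
          List.reverse_cons, List.reverse_nil, List.nil_append, List.singleton_append,
          aRun_cons_of_nonempty _ _ (by rw [clean_eq]; exact hb), clean_eq]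
    · -- ordinary character: B extends the buffer, A extends the current token
      have hB : bStep (words, cleanL cur.reverse) c = (words, cleanL (c :: cur).reverse) := by
        simp [bStep, hs, List.reverse_cons, cleanL, PySem.Chars.lower]
      rw [bRun_cons, hB, ih (c :: cur) words, if_neg hs]

-- ===== VERDICT (by name: the statement is the Claim_ definition above) =====
theorem TxtWordEX_spec : Claim_equal_TxtWordEX := by
  intro Txt _
  show TxtWordEX Txt = TxtWordEX_alt Txt
  have h := main_lemma Txt.toList [] []
  rw [List.reverse_nil, cleanL_nil] at h
  simpa [TxtWordEX, TxtWordEX_alt, aRun, bRun, PySem.Chars.split₀] using h.symm
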